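-- pv_equiv track=rewrite | github.com/jaseci-labs/jac-client-playground | scripts/bundle_jaclang.py | patch_compiler_jac
-- ===== SOURCE A (Python) =====
-- def patch_compiler_jac(content: str) -> str:
--     """Remove native pass imports from compiler.jac."""
--     lines = content.split("\n")
--     patched = []
--     skip_next = False
--     for line in lines:
--         stripped = line.strip()
--         if "jaclang.compiler.passes.native" in stripped:
--             skip_next = True
--             continue
--         if skip_next and "NaIRGenPass" in stripped:
--             skip_next = False
--             continue
--         skip_next = False
--         patched.append(line)
--     return "\n".join(patched)
-- ===== SOURCE B (Python) =====
-- def patch_compiler_jac(content: str) -> str: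
--     """Remove native pass imports from compiler.jac."""
--     lines = content.split("\n")
--     out = []
--     i, n = 0, len(lines)
--     while i < n:
--         if "jaclang.compiler.passes.native" in lines[i].strip():
--             # skip the whole run of consecutive native-import lines as one block
--             while i < n and "jaclang.compiler.passes.native" in lines[i].strip():
--                 i += 1
--             # the block also swallows one immediately following NaIRGenPass line
--             if i < n and "NaIRGenPass" in lines[i].strip():
--                 i += 1
--             continue
--         out.append(lines[i])
--         i += 1
--     return "\n".join(out)
-- ===== Notes on version B (the rewrite author's own statement) =====
-- stated objective: alternative
-- what changed: Replaces A's per-line loop with a hidden skip_next flag by a block-skipping scanner: an inner loop consumes each run of consecutive native-import lines as one unit and then swallows at most one immediately following NaIRGenPass line, so no boolean state crosses iterations of the outer loop.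
import Mathlib
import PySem

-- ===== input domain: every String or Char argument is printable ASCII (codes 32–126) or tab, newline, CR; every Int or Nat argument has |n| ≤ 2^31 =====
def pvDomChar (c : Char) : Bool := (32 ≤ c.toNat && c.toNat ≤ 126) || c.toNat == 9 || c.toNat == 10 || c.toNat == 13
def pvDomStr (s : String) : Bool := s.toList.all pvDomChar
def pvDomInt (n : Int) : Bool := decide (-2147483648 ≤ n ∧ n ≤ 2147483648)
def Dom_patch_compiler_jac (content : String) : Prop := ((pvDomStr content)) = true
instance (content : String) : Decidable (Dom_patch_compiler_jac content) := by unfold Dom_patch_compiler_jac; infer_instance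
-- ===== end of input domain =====

-- B replaces A's stateful skip_next flag loop by a block-skipping scanner (a run of
-- native lines plus at most one following NaIRGenPass line is consumed as one block);
-- same O(n) cost, different decomposition.

-- ===== PORT A =====
def patch_compiler_jac (content : String) : String :=
  let lines := (PySem.Str.split? content "\n").getD []
  let st := lines.foldl (fun (st : List String × Bool) line =>
    let stripped := PySem.Str.strip line
    if PySem.Str.isIn "jaclang.compiler.passes.native" stripped then (st.1, true)
    else if st.2 && PySem.Str.isIn "NaIRGenPass" stripped then (st.1, false)
    else (st.1 ++ [line], false)) ([], false)
  PySem.Str.join "\n" st.1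

-- ===== PORT B =====
-- outer scanner of Source B: copy a line, or hand a native block to pvSkipBlock
mutual
def pvScan : List String → List String
  | [] => []
  | l :: ls =>
    if PySem.Str.isIn "jaclang.compiler.passes.native" (PySem.Str.strip l) then pvSkipBlock ls
    else l :: pvScan ls
-- inner loop of Source B: consume the run of native lines, then at most one NaIRGenPass line
def pvSkipBlock : List String → List String
  | [] => []
  | l :: ls =>
    if PySem.Str.isIn "jaclang.compiler.passes.native" (PySem.Str.strip l) then pvSkipBlock ls
    else if PySem.Str.isIn "NaIRGenPass" (PySem.Str.strip l) then pvScan ls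
    else l :: pvScan ls
end

def patch_compiler_jac_alt (content : String) : String :=
  let lines := (PySem.Str.split? content "\n").getD []
  PySem.Str.join "\n" (pvScan lines)

-- ===== PRECONDITION & SPEC =====
def Spec_patch_compiler_jac (content : String) (out : String) : Prop := out = patch_compiler_jac_alt content
instance (content : String) (out : String) : Decidable (Spec_patch_compiler_jac content out) := by unfold Spec_patch_compiler_jac; infer_instance

-- ===== CLAIM (what is proved, stated in full; the proofs are below) =====
def Claim_equal_patch_compiler_jac : Prop := ∀ (content : String), Dom_patch_compiler_jac content → Spec_patch_compiler_jac content (patch_compiler_jac content)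

-- ===== LEMMAS AND PROOFS =====

-- A's fold with skip flag b computes acc ++ (pvSkipBlock / pvScan) of the rest
theorem pv_loopA (lines : List String) : ∀ (acc : List String) (skip : Bool),
    (lines.foldl (fun (st : List String × Bool) line =>
      let stripped := PySem.Str.strip line
      if PySem.Str.isIn "jaclang.compiler.passes.native" stripped then (st.1, true)
      else if st.2 && PySem.Str.isIn "NaIRGenPass" stripped then (st.1, false)
      else (st.1 ++ [line], false)) (acc, skip)).1
      = acc ++ (if skip then pvSkipBlock lines else pvScan lines) := by
  induction lines with
  | nil => intro acc skip; cases skip <;> simp [pvScan, pvSkipBlock]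
  | cons l ls ih =>
    intro acc skip
    simp only [List.foldl_cons]
    by_cases h1 : PySem.Chars.isIn "jaclang.compiler.passes.native".toList (PySem.Chars.strip l.toList) = true
    · cases skip <;> simp_all [pvScan, pvSkipBlock, PySem.Str.isIn, PySem.Str.strip]
    · by_cases h2 : PySem.Chars.isIn "NaIRGenPass".toList (PySem.Chars.strip l.toList) = true
      · cases skip <;> simp_all [pvScan, pvSkipBlock, PySem.Str.isIn, PySem.Str.strip]
      · cases skip <;> simp_all [pvScan, pvSkipBlock, PySem.Str.isIn, PySem.Str.strip]

-- ===== VERDICT (by name: the statement is the Claim_ definition above) =====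
theorem patch_compiler_jac_spec : Claim_equal_patch_compiler_jac := by
  intro content _
  unfold Spec_patch_compiler_jac patch_compiler_jac patch_compiler_jac_alt
  simp only [pv_loopA, if_neg Bool.false_ne_true, List.nil_append]
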